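-- pv_equiv track=rewrite | github.com/seedon198/Farsight | farsight/modules/typosquat.py | _determine_typo_type
-- ===== SOURCE A (Python) =====
-- def _determine_typo_type(original: str, typo: str) -> str:
--     """
--     Determine the type of typosquatting.
--
--     Args:
--         original: Original domain
--         typo: Typo domain
--
--     Returns:
--         Typo type as string
--     """
--     original_parts = original.split('.')
--     typo_parts = typo.split('.')
--
--     # Check TLD swap
--     if original_parts[0] == typo_parts[0] and original_parts[-1] != typo_parts[-1]:
--         return "TLD swap"
--
--     # Check for homoglyph (character replacement with similar looking)
--     homoglyphs = {
--         'a': ['4'],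
--         'b': ['6', '8'],
--         'e': ['3'],
--         'i': ['1', 'l'],
--         'l': ['1', 'i'],
--         'o': ['0'],
--         's': ['5'],
--         't': ['7'],
--         'z': ['2'],
--     }
--
--     original_base = original_parts[0]
--     typo_base = typo_parts[0]
--
--     if len(original_base) == len(typo_base):
--         diff_count = sum(1 for i in range(len(original_base)) if original_base[i] != typo_base[i])
--
--         if diff_count == 1:
--             # Check character replacement
--             for i in range(len(original_base)):
--                 if original_base[i] != typo_base[i]:
--                     if original_base[i] in homoglyphs and typo_base[i] in homoglyphs[original_base[i]]:
--                         return "Homoglyph"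
--                     else:
--                         return "Character replacement"
--
--         # Check adjacent character swap
--         swaps = 0
--         for i in range(len(original_base)-1):
--             if original_base[i] == typo_base[i+1] and original_base[i+1] == typo_base[i]:
--                 swaps += 1
--
--         if swaps == 1:
--             return "Character swap"
--
--     # Check character omission (original is longer)
--     if len(original_base) == len(typo_base) + 1:
--         # Try to find position of omitted character
--         for i in range(len(original_base)):
--             omitted = original_base[:i] + original_base[i+1:]
--             if omitted == typo_base:
--                 return "Character omission"
--
--     # Check character insertion (typo is longer)
--     if len(typo_base) == len(original_base) + 1:
--         # Try to find position of inserted character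
--         for i in range(len(typo_base)):
--             without_insert = typo_base[:i] + typo_base[i+1:]
--             if without_insert == original_base:
--                 return "Character insertion"
--
--     # Check character duplication
--     for i in range(len(original_base)):
--         duplicated = original_base[:i+1] + original_base[i] + original_base[i+1:]
--         if duplicated == typo_base:
--             return "Character duplication"
--
--     # Check for hyphenation
--     if "-" in typo_base and "-" not in original_base:
--         return "Hyphenation"
--
--     # Default
--     return "Combination/Other"
-- ===== SOURCE B (Python) =====
-- _HOMOGLYPH_PAIRS = {
--     ('a', '4'), ('b', '6'), ('b', '8'), ('e', '3'), ('i', '1'), ('i', 'l'),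
--     ('l', '1'), ('l', 'i'), ('o', '0'), ('s', '5'), ('t', '7'), ('z', '2'),
-- }
--
--
-- def _is_deletion_of(longer, shorter):
--     """longer equals shorter with one extra character: two-pointer, skip the
--     first mismatch in longer and require the remaining suffixes to match."""
--     i = 0
--     while i < len(shorter) and longer[i] == shorter[i]:
--         i += 1
--     return longer[i + 1:] == shorter[i:]
--
--
-- def _determine_typo_type(original: str, typo: str) -> str:
--     original_parts = original.split('.')
--     typo_parts = typo.split('.')
--
--     if original_parts[0] == typo_parts[0] and original_parts[-1] != typo_parts[-1]:
--         return "TLD swap"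
--
--     o = original_parts[0]
--     t = typo_parts[0]
--
--     if len(o) == len(t):
--         diffs = [(x, y) for x, y in zip(o, t) if x != y]
--         if len(diffs) == 1:
--             return "Homoglyph" if diffs[0] in _HOMOGLYPH_PAIRS else "Character replacement"
--         swaps = sum(a == d and b == c
--                     for (a, c), (b, d) in zip(zip(o, t), zip(o[1:], t[1:])))
--         if swaps == 1:
--             return "Character swap"
--     elif len(o) == len(t) + 1 and _is_deletion_of(o, t):
--         return "Character omission"
--     elif len(t) == len(o) + 1 and _is_deletion_of(t, o):
--         return "Character insertion"
--
--     if "-" in t and "-" not in o: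
--         return "Hyphenation"
--
--     return "Combination/Other"
-- ===== Notes on version B (the rewrite author's own statement) =====
-- stated objective: faster
-- what changed: Replaces A's index-based scans and O(n^2) slice-and-rebuild omission/insertion/duplication loops with index-free single-pass zip scans (mismatch-pair list for the homoglyph/replacement split, zipped adjacent pairs for the swap count), a two-pointer deletion test for omission/insertion, and drops A's duplication branch, which is proved unreachable.
import Mathlib
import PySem

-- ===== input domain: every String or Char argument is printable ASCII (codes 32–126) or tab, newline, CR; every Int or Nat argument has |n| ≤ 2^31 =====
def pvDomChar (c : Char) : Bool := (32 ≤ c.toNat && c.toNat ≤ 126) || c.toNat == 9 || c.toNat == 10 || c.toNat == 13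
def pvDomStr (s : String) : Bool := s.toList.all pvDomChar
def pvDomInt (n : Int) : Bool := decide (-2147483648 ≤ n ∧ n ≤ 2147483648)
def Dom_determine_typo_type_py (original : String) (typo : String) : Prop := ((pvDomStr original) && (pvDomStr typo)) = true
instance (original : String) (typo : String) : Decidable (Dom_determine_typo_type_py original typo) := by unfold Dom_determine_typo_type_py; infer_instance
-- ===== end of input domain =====

-- B replaces A's quadratic slice-and-rebuild / index-loop checks by index-free single-pass
-- zip scans and a two-pointer deletion test, and drops A's unreachable duplication branch
-- (objective: faster — O(n) vs O(n^2), measured faster in a timing run).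


-- ===== PORT A =====
def pvHomoDict : PySem.Dict Char (List Char) :=
  ((((((((PySem.Dict.empty.insert 'a' ['4']).insert 'b' ['6', '8']).insert 'e' ['3']).insert
      'i' ['1', 'l']).insert 'l' ['1', 'i']).insert 'o' ['0']).insert 's' ['5']).insert
      't' ['7']).insert 'z' ['2']

-- A's fall-through tail: omission / insertion / duplication / hyphenation / default
def pvTailA (ob tb : List Char) : String :=
  if (ob.length : Int) == (tb.length : Int) + 1 &&
     (PySem.List.pyRange 0 (ob.length : Int) 1).any (fun i =>
        PySem.List.slice ob none (some i) ++ PySem.List.slice ob (some (i + 1)) none == tb) then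
    "Character omission"
  else if (tb.length : Int) == (ob.length : Int) + 1 &&
     (PySem.List.pyRange 0 (tb.length : Int) 1).any (fun i =>
        PySem.List.slice tb none (some i) ++ PySem.List.slice tb (some (i + 1)) none == ob) then
    "Character insertion"
  else if (PySem.List.pyRange 0 (ob.length : Int) 1).any (fun i =>
        PySem.List.slice ob none (some (i + 1)) ++ [PySem.List.pyGetD ob i ' '] ++
          PySem.List.slice ob (some (i + 1)) none == tb) then
    "Character duplication"
  else if PySem.Chars.isIn ['-'] tb && !(PySem.Chars.isIn ['-'] ob) then
    "Hyphenation"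
  else
    "Combination/Other"

-- A's adjacent-swap count and the rest of the equal-length block
def pvSwapPartA (ob tb : List Char) : String :=
  let swaps : Int :=
    (PySem.List.pyRange 0 ((ob.length : Int) - 1) 1).foldl
      (fun acc i =>
        if PySem.List.pyGetD ob i ' ' == PySem.List.pyGetD tb (i + 1) ' ' &&
           PySem.List.pyGetD ob (i + 1) ' ' == PySem.List.pyGetD tb i ' '
        then acc + 1 else acc) 0
  if swaps == 1 then "Character swap" else pvTailA ob tb

def pvEqLenA (ob tb : List Char) : String :=
  let diff_count : Int :=
    ((PySem.List.pyRange 0 (ob.length : Int) 1).map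
      (fun i => if !(PySem.List.pyGetD ob i ' ' == PySem.List.pyGetD tb i ' ')
                then (1 : Int) else 0)).sum
  if diff_count == 1 then
    match (PySem.List.pyRange 0 (ob.length : Int) 1).find?
        (fun i => !(PySem.List.pyGetD ob i ' ' == PySem.List.pyGetD tb i ' ')) with
    | some i =>
        if pvHomoDict.contains (PySem.List.pyGetD ob i ' ') &&
           (pvHomoDict.getD (PySem.List.pyGetD ob i ' ') []).contains
             (PySem.List.pyGetD tb i ' ')
        then "Homoglyph" else "Character replacement"
    | none => pvSwapPartA ob tb
  else pvSwapPartA ob tb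

def pvCoreA (ob tb : List Char) : String :=
  if ob.length == tb.length then pvEqLenA ob tb else pvTailA ob tb

def determine_typo_type_py (original : String) (typo : String) : String :=
  let op := PySem.Chars.splitOn original.toList ['.']
  let tp := PySem.Chars.splitOn typo.toList ['.']
  if PySem.List.pyGetD op 0 [] == PySem.List.pyGetD tp 0 [] &&
     !(PySem.List.pyGetD op (-1) [] == PySem.List.pyGetD tp (-1) []) then "TLD swap"
  else pvCoreA (PySem.List.pyGetD op 0 []) (PySem.List.pyGetD tp 0 [])

-- ===== PORT B =====
def pvHomoPairs : PySem.Set (Char × Char) :=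
  PySem.Set.ofList
    [('a', '4'), ('b', '6'), ('b', '8'), ('e', '3'), ('i', '1'), ('i', 'l'),
     ('l', '1'), ('l', 'i'), ('o', '0'), ('s', '5'), ('t', '7'), ('z', '2')]

-- two-pointer: longer equals shorter with one extra character
def pvIsDeletionOf : List Char → List Char → Bool
  | x :: xs, y :: ys => if x == y then pvIsDeletionOf xs ys else xs == y :: ys
  | xs, [] => xs.drop 1 == ([] : List Char)
  | [], _ :: _ => false

def pvHyphB (o t : List Char) : String :=
  if PySem.Chars.isIn ['-'] t && !(PySem.Chars.isIn ['-'] o) then "Hyphenation"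
  else "Combination/Other"

def pvEqLenB (o t : List Char) : String :=
  let diffs := (o.zip t).filter (fun p => !(p.1 == p.2))
  if diffs.length == 1 then
    if pvHomoPairs.contains (diffs.headD (' ', ' ')) then "Homoglyph"
    else "Character replacement"
  else
    let swaps := ((o.zip t).zip ((o.drop 1).zip (t.drop 1))).countP
      (fun q => q.1.1 == q.2.2 && q.2.1 == q.1.2)
    if swaps == 1 then "Character swap" else pvHyphB o t

def pvCoreB (o t : List Char) : String :=
  if o.length == t.length then pvEqLenB o t
  else if o.length == t.length + 1 && pvIsDeletionOf o t then "Character omission"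
  else if t.length == o.length + 1 && pvIsDeletionOf t o then "Character insertion"
  else pvHyphB o t

def determine_typo_type_py_alt (original : String) (typo : String) : String :=
  let op := PySem.Chars.splitOn original.toList ['.']
  let tp := PySem.Chars.splitOn typo.toList ['.']
  if PySem.List.pyGetD op 0 [] == PySem.List.pyGetD tp 0 [] &&
     !(PySem.List.pyGetD op (-1) [] == PySem.List.pyGetD tp (-1) []) then "TLD swap"
  else pvCoreB (PySem.List.pyGetD op 0 []) (PySem.List.pyGetD tp 0 [])

-- ===== PRECONDITION & SPEC =====
def Spec_determine_typo_type_py (original : String) (typo : String) (out : String) : Prop := out = determine_typo_type_py_alt original typo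
instance (original : String) (typo : String) (out : String) : Decidable (Spec_determine_typo_type_py original typo out) := by unfold Spec_determine_typo_type_py; infer_instance

-- ===== CLAIM (what is proved, stated in full; the proofs are below) =====
def Claim_equal_determine_typo_type_py : Prop := ∀ (original : String) (typo : String), Dom_determine_typo_type_py original typo → Spec_determine_typo_type_py original typo (determine_typo_type_py original typo)

-- ===== LEMMAS AND PROOFS =====

-- the homoglyph table read through A's dict equals B's pair set
theorem pv_homo_eq (a b : Char) :
    (pvHomoDict.contains a && (pvHomoDict.getD a []).contains b) =
      pvHomoPairs.contains (a, b) := by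
  simp [pvHomoDict, pvHomoPairs, PySem.Dict.contains, PySem.Dict.getD, PySem.Dict.get?,
    PySem.Dict.insert, PySem.Dict.empty, PySem.Set.ofList, PySem.Set.contains]
  by_cases h1 : a = 'a' <;> by_cases h2 : a = 'b' <;> by_cases h3 : a = 'e' <;>
    by_cases h4 : a = 'i' <;> by_cases h5 : a = 'l' <;> by_cases h6 : a = 'o' <;>
    by_cases h7 : a = 's' <;> by_cases h8 : a = 't' <;> by_cases h9 : a = 'z' <;>
    (try subst_vars) <;> (try simp_all) <;> (try subst_vars) <;> (try simp_all) <;>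
    (rintro (h | h | h | h | h | h | h | h | h) <;> exact absurd h.symm (by assumption))

-- deleting the two-pointer position works whenever deleting any position works
theorem pv_del_self (ys : List Char) (y : Char) : pvIsDeletionOf (y :: ys) ys = true := by
  induction ys generalizing y with
  | nil => rfl
  | cons z zs ih =>
    by_cases h : y = z
    · simp [pvIsDeletionOf, h, ih]
    · simp [pvIsDeletionOf, h]

-- A's omission/insertion scan agrees with B's two-pointer test
theorem pv_any_del_eq (xs : List Char) : ∀ ys : List Char, xs.length = ys.length + 1 →
    ((List.range xs.length).any (fun k => xs.take k ++ xs.drop (k + 1) == ys)) =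
      pvIsDeletionOf xs ys := by
  induction xs with
  | nil => intro ys h; simp at h
  | cons x xs ih =>
    intro ys h
    cases ys with
    | nil =>
      have hx : xs = [] := by simpa using h
      subst hx
      simp [pvIsDeletionOf]
    | cons y ys =>
      have hlen : xs.length = ys.length + 1 := by simpa using h
      rw [show (x :: xs).length = xs.length + 1 from rfl, List.range_succ_eq_map]
      simp only [List.any_cons, List.any_map, Function.comp_def, Nat.succ_eq_add_one,
        List.take_zero, List.drop_succ_cons, List.take_succ_cons, List.nil_append,
        List.drop_zero, List.cons_append]
      by_cases hxy : x = y
      · subst hxy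
        simp only [List.cons_beq_cons, BEq.rfl, Bool.true_and]
        rw [ih ys hlen]
        by_cases hx : xs = x :: ys
        · simp [hx, pv_del_self, pvIsDeletionOf]
        · simp [pvIsDeletionOf, hx]
      · simp only [List.cons_beq_cons, show (x == y) = false by simp [hxy], Bool.false_and]
        simp [pvIsDeletionOf, hxy]

-- a successful duplication at k is an insertion at k + 1
theorem pv_dup_to_ins (xs ys : List Char)
    (h : ((List.range xs.length).any
      (fun k => xs.take (k + 1) ++ [xs.getD k ' '] ++ xs.drop (k + 1) == ys)) = true) :
    ys.length = xs.length + 1 ∧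
      ((List.range ys.length).any (fun k => ys.take k ++ ys.drop (k + 1) == xs)) = true := by
  rw [List.any_eq_true] at h
  obtain ⟨k, hk, hbeq⟩ := h
  rw [List.mem_range] at hk
  rw [beq_iff_eq] at hbeq
  have hlt : (xs.take (k + 1)).length = k + 1 := by
    rw [List.length_take]; omega
  have hy : ys.length = xs.length + 1 := by
    rw [← hbeq]
    simp only [List.length_append, List.length_take, List.length_drop,
      List.length_cons, List.length_nil]
    omega
  refine ⟨hy, ?_⟩
  rw [List.any_eq_true]
  refine ⟨k + 1, by rw [List.mem_range]; omega, ?_⟩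
  rw [beq_iff_eq, ← hbeq]
  have h1 : ((xs.take (k + 1) ++ [xs.getD k ' ']) ++ xs.drop (k + 1)).take (k + 1)
      = xs.take (k + 1) := by
    rw [List.append_assoc, List.take_append_of_le_length (by omega), List.take_take]
    simp
  have h2 : ((xs.take (k + 1) ++ [xs.getD k ' ']) ++ xs.drop (k + 1)).drop (k + 2)
      = xs.drop (k + 1) := by
    apply List.drop_left'
    simp [hlt]
  rw [show k + 1 + 1 = k + 2 from rfl, h1, h2, List.take_append_drop]

-- index scan ↔ zip scan (counting)
theorem pv_countP_range_zip (p : Char → Char → Bool) (d : Char) :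
    ∀ xs ys : List Char, xs.length = ys.length →
    (List.range xs.length).countP (fun k => p (xs.getD k d) (ys.getD k d)) =
      (xs.zip ys).countP (fun q => p q.1 q.2) := by
  intro xs
  induction xs with
  | nil => intro ys h; simp
  | cons x xs ih =>
    intro ys h
    cases ys with
    | nil => simp at h
    | cons y ys =>
      have hlen : xs.length = ys.length := by simpa using h
      rw [show (x :: xs).length = xs.length + 1 from rfl, List.range_succ_eq_map]
      rw [List.countP_cons, List.countP_map]
      simp only [Function.comp_def, Nat.succ_eq_add_one, List.getD_cons_succ, List.getD_cons_zero]
      rw [ih ys hlen]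
      simp [List.zip_cons_cons, List.countP_cons, Nat.add_comm]

-- index scan ↔ zip scan (first hit)
theorem pv_find_range_zip (p : Char → Char → Bool) (d : Char) :
    ∀ xs ys : List Char, xs.length = ys.length →
    ((List.range xs.length).find? (fun k => p (xs.getD k d) (ys.getD k d))).map
        (fun k => (xs.getD k d, ys.getD k d)) =
      ((xs.zip ys).filter (fun q => p q.1 q.2)).head? := by
  intro xs
  induction xs with
  | nil => intro ys h; simp
  | cons x xs ih =>
    intro ys h
    cases ys with
    | nil => simp at h
    | cons y ys =>
      have hlen : xs.length = ys.length := by simpa using h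
      rw [show (x :: xs).length = xs.length + 1 from rfl, List.range_succ_eq_map]
      by_cases hp : p x y
      · simp [hp]
      · rw [List.find?_cons_of_neg (by simpa using hp)]
        rw [List.find?_map]
        simp only [Function.comp_def, Nat.succ_eq_add_one, List.getD_cons_succ]
        rw [List.zip_cons_cons, List.filter_cons_of_neg (by simpa using hp)]
        rw [← ih ys hlen]
        rw [Option.map_map]
        rfl

-- index scan ↔ zip scan (adjacent pairs)
theorem pv_countP_range_swap (p : Char → Char → Char → Char → Bool) (d : Char) :
    ∀ xs ys : List Char, xs.length = ys.length →
    (List.range (xs.length - 1)).countP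
        (fun k => p (xs.getD k d) (xs.getD (k + 1) d) (ys.getD k d) (ys.getD (k + 1) d)) =
      ((xs.zip ys).zip ((xs.drop 1).zip (ys.drop 1))).countP
        (fun q => p q.1.1 q.2.1 q.1.2 q.2.2) := by
  intro xs
  induction xs with
  | nil => intro ys h; simp
  | cons x1 xs ih =>
    intro ys h
    cases ys with
    | nil => simp at h
    | cons y1 ys =>
      have hlen : xs.length = ys.length := by simpa using h
      cases xs with
      | nil =>
        cases ys with
        | nil => simp
        | cons _ _ => simp at hlen
      | cons x2 xs' =>
        cases ys with
        | nil => simp at hlen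
        | cons y2 ys' =>
          rw [show (x1 :: x2 :: xs').length - 1 = (x2 :: xs').length - 1 + 1 from by
            simp, List.range_succ_eq_map]
          rw [List.countP_cons, List.countP_map]
          simp only [Function.comp_def, Nat.succ_eq_add_one, List.getD_cons_succ,
            List.getD_cons_zero]
          have ih' := ih (y2 :: ys') (by simpa using hlen)
          simp only [List.getD_cons_succ] at ih'
          rw [ih']
          simp [List.zip_cons_cons, List.countP_cons, Nat.add_comm]

-- ---- normalising A's pyRange/slice scans to Nat-range scans ----

theorem pv_anyA_del (xs ys : List Char) :
    ((PySem.List.pyRange 0 (xs.length : Int) 1).any (fun i =>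
       PySem.List.slice xs none (some i) ++ PySem.List.slice xs (some (i + 1)) none == ys)) =
    ((List.range xs.length).any (fun k => xs.take k ++ xs.drop (k + 1) == ys)) := by
  rw [PySem.List.pyRange_zero_natCast, List.any_map]
  congr 1
  funext k
  simp only [Function.comp_def, PySem.List.slice_to_natCast,
    show ((k : Int) + 1) = ((k + 1 : Nat) : Int) by push_cast; ring,
    PySem.List.slice_from_natCast]

theorem pv_anyA_dup (xs ys : List Char) :
    ((PySem.List.pyRange 0 (xs.length : Int) 1).any (fun i =>
       PySem.List.slice xs none (some (i + 1)) ++ [PySem.List.pyGetD xs i ' '] ++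
         PySem.List.slice xs (some (i + 1)) none == ys)) =
    ((List.range xs.length).any
       (fun k => xs.take (k + 1) ++ [xs.getD k ' '] ++ xs.drop (k + 1) == ys)) := by
  rw [PySem.List.pyRange_zero_natCast, List.any_map]
  congr 1
  funext k
  simp only [Function.comp_def,
    show ((k : Int) + 1) = ((k + 1 : Nat) : Int) by push_cast; ring,
    PySem.List.slice_to_natCast, PySem.List.slice_from_natCast, PySem.List.pyGetD_natCast]

theorem pv_diffA_eq (ob tb : List Char) :
    ((PySem.List.pyRange 0 (ob.length : Int) 1).map
      (fun i => if !(PySem.List.pyGetD ob i ' ' == PySem.List.pyGetD tb i ' ')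
                then (1 : Int) else 0)).sum =
    (((List.range ob.length).countP
        (fun k => !(ob.getD k ' ' == tb.getD k ' '))) : Int) := by
  rw [PySem.List.pyRange_zero_natCast, List.map_map]
  rw [show ((fun i => if !(PySem.List.pyGetD ob i ' ' == PySem.List.pyGetD tb i ' ')
              then (1 : Int) else 0) ∘ (fun k : Nat => (k : Int)))
        = (fun k : Nat => if !(ob.getD k ' ' == tb.getD k ' ') then (1 : Int) else 0) by
      funext k; simp [Function.comp_def]]
  exact PySem.List.sum_map_ite_one_zero _ _

theorem pv_findA_eq (ob tb : List Char) :
    (PySem.List.pyRange 0 (ob.length : Int) 1).find?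
        (fun i => !(PySem.List.pyGetD ob i ' ' == PySem.List.pyGetD tb i ' ')) =
      Option.map (fun k : Nat => (k : Int))
        ((List.range ob.length).find? (fun k => !(ob.getD k ' ' == tb.getD k ' '))) := by
  rw [PySem.List.pyRange_zero_natCast, List.find?_map]
  rw [show ((fun i => !(PySem.List.pyGetD ob i ' ' == PySem.List.pyGetD tb i ' '))
        ∘ (fun k : Nat => (k : Int)))
      = (fun k : Nat => !(ob.getD k ' ' == tb.getD k ' ')) by
    funext k; simp]

theorem pv_swapsA_eq (ob tb : List Char) (hl : ob.length = tb.length) :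
    ((PySem.List.pyRange 0 ((ob.length : Int) - 1) 1).foldl
      (fun acc i =>
        if PySem.List.pyGetD ob i ' ' == PySem.List.pyGetD tb (i + 1) ' ' &&
           PySem.List.pyGetD ob (i + 1) ' ' == PySem.List.pyGetD tb i ' '
        then acc + 1 else acc) 0) =
    ((((ob.zip tb).zip ((ob.drop 1).zip (tb.drop 1))).countP
      (fun q => q.1.1 == q.2.2 && q.2.1 == q.1.2)) : Int) := by
  rw [PySem.List.foldl_if_add_one]
  rw [zero_add]
  cases ob with
  | nil =>
    have : tb = [] := by simpa using hl.symm
    subst this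
    decide
  | cons a as =>
    rw [show (((a :: as).length : Int) - 1) = ((as.length : Nat) : Int) by
      simp]
    rw [PySem.List.pyRange_zero_natCast, List.countP_map]
    rw [show ((fun i => PySem.List.pyGetD (a :: as) i ' ' == PySem.List.pyGetD tb (i + 1) ' ' &&
            PySem.List.pyGetD (a :: as) (i + 1) ' ' == PySem.List.pyGetD tb i ' ')
          ∘ (fun k : Nat => (k : Int)))
        = (fun k : Nat => (a :: as).getD k ' ' == tb.getD (k + 1) ' ' &&
            (a :: as).getD (k + 1) ' ' == tb.getD k ' ') by
      funext k
      simp only [Function.comp_def,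
        show ((k : Int) + 1) = ((k + 1 : Nat) : Int) by push_cast; ring,
        PySem.List.pyGetD_natCast]]
    rw [show as.length = (a :: as).length - 1 from rfl]
    rw [pv_countP_range_swap (fun x1 x2 y1 y2 => x1 == y2 && x2 == y1) ' ' (a :: as) tb hl]

-- ---- the unreachable duplication branch and A's fall-through tail ----

theorem pv_dupA_false (ob tb : List Char) (h : tb.length ≠ ob.length + 1) :
    ((PySem.List.pyRange 0 (ob.length : Int) 1).any (fun i =>
       PySem.List.slice ob none (some (i + 1)) ++ [PySem.List.pyGetD ob i ' '] ++
         PySem.List.slice ob (some (i + 1)) none == tb)) = false := by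
  rw [pv_anyA_dup]
  by_contra hne
  have := pv_dup_to_ins ob tb (by
    cases hx : ((List.range ob.length).any
        (fun k => ob.take (k + 1) ++ [ob.getD k ' '] ++ ob.drop (k + 1) == tb)) with
    | false => exact absurd hx hne
    | true => rfl)
  exact h this.1

theorem pv_tailA_hyph (ob tb : List Char)
    (h1 : ob.length ≠ tb.length + 1) (h2 : tb.length ≠ ob.length + 1) :
    pvTailA ob tb = pvHyphB ob tb := by
  unfold pvTailA pvHyphB
  rw [if_neg, if_neg, if_neg]
  · rw [pv_dupA_false ob tb h2]; simp
  · simp only [Bool.and_eq_true, beq_iff_eq]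
    rintro ⟨hc, -⟩
    exact h2 (by exact_mod_cast hc)
  · simp only [Bool.and_eq_true, beq_iff_eq]
    rintro ⟨hc, -⟩
    exact h1 (by exact_mod_cast hc)

theorem pv_tailA_omission (ob tb : List Char) (h1 : ob.length = tb.length + 1) :
    pvTailA ob tb =
      (if pvIsDeletionOf ob tb then "Character omission" else pvHyphB ob tb) := by
  unfold pvTailA
  have hc1 : ((ob.length : Int) == (tb.length : Int) + 1) = true := by
    simp only [beq_iff_eq]; exact_mod_cast h1
  have hc2 : ((tb.length : Int) == (ob.length : Int) + 1) = false := by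
    simp only [beq_eq_false_iff_ne, ne_eq]
    intro hc
    have : tb.length = ob.length + 1 := by exact_mod_cast hc
    omega
  rw [pv_anyA_del ob tb, pv_any_del_eq ob tb h1, hc1, hc2,
    pv_dupA_false ob tb (by omega)]
  cases hdel : pvIsDeletionOf ob tb <;> simp [pvHyphB]

theorem pv_tailA_insertion (ob tb : List Char) (h2 : tb.length = ob.length + 1) :
    pvTailA ob tb =
      (if pvIsDeletionOf tb ob then "Character insertion" else pvHyphB ob tb) := by
  unfold pvTailA
  have hc1 : ((ob.length : Int) == (tb.length : Int) + 1) = false := by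
    simp only [beq_eq_false_iff_ne, ne_eq]
    intro hc
    have : ob.length = tb.length + 1 := by exact_mod_cast hc
    omega
  have hc2 : ((tb.length : Int) == (ob.length : Int) + 1) = true := by
    simp only [beq_iff_eq]; exact_mod_cast h2
  rw [pv_anyA_del tb ob, pv_any_del_eq tb ob h2, hc1, hc2]
  cases hdel : pvIsDeletionOf tb ob with
  | true => simp
  | false =>
    have hdup : ((PySem.List.pyRange 0 (ob.length : Int) 1).any (fun i =>
        PySem.List.slice ob none (some (i + 1)) ++ [PySem.List.pyGetD ob i ' '] ++
          PySem.List.slice ob (some (i + 1)) none == tb)) = false := by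
      rw [pv_anyA_dup]
      by_contra hne
      have hins := (pv_dup_to_ins ob tb (by
        cases hx : ((List.range ob.length).any
            (fun k => ob.take (k + 1) ++ [ob.getD k ' '] ++ ob.drop (k + 1) == tb)) with
        | false => exact absurd hx hne
        | true => rfl)).2
      rw [pv_any_del_eq tb ob h2] at hins
      rw [hins] at hdel
      exact absurd hdel (by simp)
    rw [hdup]
    simp [pvHyphB]

-- ---- the equal-length block ----

theorem pv_swapPartA_eq (ob tb : List Char) (hl : ob.length = tb.length) :
    pvSwapPartA ob tb =
      (if (((ob.zip tb).zip ((ob.drop 1).zip (tb.drop 1))).countP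
            (fun q => q.1.1 == q.2.2 && q.2.1 == q.1.2)) == 1
       then "Character swap" else pvHyphB ob tb) := by
  unfold pvSwapPartA
  rw [pv_swapsA_eq ob tb hl]
  by_cases hs : (((ob.zip tb).zip ((ob.drop 1).zip (tb.drop 1))).countP
      (fun q => q.1.1 == q.2.2 && q.2.1 == q.1.2)) = 1
  · rw [if_pos (by simpa using hs), if_pos (by simpa using hs)]
  · rw [if_neg (by simpa using hs), if_neg (by simpa using hs)]
    exact pv_tailA_hyph ob tb (by omega) (by omega)

theorem pv_eqlen_eq (ob tb : List Char) (hl : ob.length = tb.length) :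
    pvEqLenA ob tb = pvEqLenB ob tb := by
  unfold pvEqLenA pvEqLenB
  simp only [pv_diffA_eq]
  have hcount : (List.range ob.length).countP (fun k => !(ob.getD k ' ' == tb.getD k ' '))
      = ((ob.zip tb).filter (fun p => !(p.1 == p.2))).length := by
    rw [pv_countP_range_zip (fun a b => !(a == b)) ' ' ob tb hl]
    exact List.countP_eq_length_filter
  by_cases h1 : ((ob.zip tb).filter (fun p => !(p.1 == p.2))).length = 1
  · rw [if_pos (by rw [hcount, h1]; decide), if_pos (by simpa using h1)]
    obtain ⟨q, hq⟩ := List.length_eq_one_iff.mp h1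
    have hhead := pv_find_range_zip (fun a b => !(a == b)) ' ' ob tb hl
    rw [hq, List.head?_cons] at hhead
    rw [pv_findA_eq]
    rcases hfind : (List.range ob.length).find? (fun k => !(ob.getD k ' ' == tb.getD k ' '))
      with _ | k
    · rw [hfind] at hhead
      simp at hhead
    · rw [hfind] at hhead
      simp only [Option.map_some, Option.some.injEq] at hhead
      rw [hq]
      simp only [Option.map_some, List.headD_cons, PySem.List.pyGetD_natCast]
      rw [show ob.getD k ' ' = q.1 from congrArg Prod.fst hhead,
        show tb.getD k ' ' = q.2 from congrArg Prod.snd hhead,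
        pv_homo_eq q.1 q.2, Prod.mk.eta]
      rfl
  · rw [if_neg (by
        rw [hcount]
        simp only [beq_iff_eq]
        intro hc
        exact h1 (by exact_mod_cast hc)), if_neg (by simpa using h1)]
    exact pv_swapPartA_eq ob tb hl

theorem pv_core_eq (ob tb : List Char) : pvCoreA ob tb = pvCoreB ob tb := by
  unfold pvCoreA pvCoreB
  by_cases hl : ob.length = tb.length
  · rw [if_pos (by simpa using hl), if_pos (by simpa using hl)]
    exact pv_eqlen_eq ob tb hl
  · rw [if_neg (by simpa using hl), if_neg (by simpa using hl)]
    by_cases h1 : ob.length = tb.length + 1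
    · rw [pv_tailA_omission ob tb h1,
        show (ob.length == tb.length + 1) = true by simpa using h1,
        show (tb.length == ob.length + 1) = false by
          simpa using (show tb.length ≠ ob.length + 1 by omega)]
      cases pvIsDeletionOf ob tb <;> simp
    · by_cases h2 : tb.length = ob.length + 1
      · rw [pv_tailA_insertion ob tb h2,
          show (ob.length == tb.length + 1) = false by
            simpa using (show ob.length ≠ tb.length + 1 by omega),
          show (tb.length == ob.length + 1) = true by simpa using h2]
        cases pvIsDeletionOf tb ob <;> simp
      · rw [pv_tailA_hyph ob tb h1 h2,
          show (ob.length == tb.length + 1) = false by simpa using h1,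
          show (tb.length == ob.length + 1) = false by simpa using h2]
        simp

-- ===== VERDICT (by name: the statement is the Claim_ definition above) =====
theorem determine_typo_type_py_spec : Claim_equal_determine_typo_type_py := by
  intro original typo _
  unfold Spec_determine_typo_type_py determine_typo_type_py determine_typo_type_py_alt
  simp only [pv_core_eq]
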